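-- pv_equiv track=rewrite | github.com/AKCIT-RL/xr_teleoperate | python_webrtc.py | clean_sdp_for_unity
-- ===== SOURCE A (Python) =====
-- def clean_sdp_for_unity(sdp, candidates=None):
--     """
--     Limpa e reorganiza o SDP para Unity WebRTC.
--     - candidates: lista de strings de candidates já filtradas
--     """
--     lines = sdp.splitlines()
--     session = []
--     media = []
--
--     # separa session vs media
--     in_media = False
--     for line in lines:
--         if not line.strip():
--             continue
--         if line.startswith("m="):
--             in_media = True
--
--         # remove problemáticos
--         if line.startswith("a=extmap-allow-mixed") or line.startswith("a=ice-options"):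
--             continue
--
--         if in_media:
--             media.append(line)
--         else:
--             session.append(line)
--
--     # msid-semantic uma vez, logo após a=group:BUNDLE
--     insert_idx = next((i for i, l in enumerate(session) if l.startswith("a=group:BUNDLE")), -1)
--     if insert_idx != -1:
--         session.insert(insert_idx + 1, "a=msid-semantic: WMS")
--     else:
--         session.append("a=msid-semantic: WMS")
--
--     # extrai campos importantes do media
--     m_application = next((l for l in media if l.startswith("m=application")), None)
--     c_line = next((l for l in media if l.startswith("c=IN")), None)
--     mid = next((l for l in media if l.startswith("a=mid")), None)
--     sctp = next((l for l in media if l.startswith("a=sctp-port")), None)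
--     fingerprint = next((l for l in media if l.startswith("a=fingerprint:sha-256")), None)
--     ice_ufrag = next((l for l in media if l.startswith("a=ice-ufrag")), None)
--     ice_pwd = next((l for l in media if l.startswith("a=ice-pwd")), None)
--
--     # monta media na ordem que Unity aceita
--     new_media = [
--         m_application,
--         c_line,
--         mid,
--         sctp,
--     ]
--
--     # adiciona candidates se fornecidos
--     if candidates:
--         new_media.extend(candidates)
--         new_media.append("a=end-of-candidates")
--
--     # adiciona ufrag/pwd/fingerprint/setup
--     new_media.extend([ice_ufrag, ice_pwd, fingerprint, "a=setup:active"])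
--
--     new_media = [l for l in new_media if l]
--
--     return "\r\n".join(session + new_media)
-- ===== SOURCE B (Python) =====
-- def clean_sdp_for_unity(sdp, candidates=None):
--     """
--     One-pass rewrite: while separating session from media lines, the msid-semantic
--     line is inserted on the fly right after the first a=group:BUNDLE line, and the
--     seven media fields of interest are collected into a first-match index (a dict,
--     set-if-absent) instead of seven separate scans over the media list.
--     """
--     PREFIXES = ("m=application", "c=IN", "a=mid", "a=sctp-port",
--                 "a=fingerprint:sha-256", "a=ice-ufrag", "a=ice-pwd")
--     fields = {}
--     session = []
--     bundle_seen = False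
--     in_media = False
--     for line in sdp.splitlines():
--         if not line.strip():
--             continue
--         if line.startswith("m="):
--             in_media = True
--         if line.startswith("a=extmap-allow-mixed") or line.startswith("a=ice-options"):
--             continue
--         if in_media:
--             for p in PREFIXES:
--                 if p not in fields and line.startswith(p):
--                     fields[p] = line
--         else:
--             session.append(line)
--             if not bundle_seen and line.startswith("a=group:BUNDLE"):
--                 session.append("a=msid-semantic: WMS")
--                 bundle_seen = True
--     if not bundle_seen:
--         session.append("a=msid-semantic: WMS")
--
--     tail = [fields.get("m=application"), fields.get("c=IN"),
--             fields.get("a=mid"), fields.get("a=sctp-port")]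
--     if candidates:
--         tail.extend(candidates)
--         tail.append("a=end-of-candidates")
--     tail.extend([fields.get("a=ice-ufrag"), fields.get("a=ice-pwd"),
--                  fields.get("a=fingerprint:sha-256"), "a=setup:active"])
--
--     return "\r\n".join(session + [l for l in tail if l])
-- ===== Notes on version B (the rewrite author's own statement) =====
-- stated objective: alternative
-- what changed: B replaces A's seven separate next()-scans over the media list and the post-hoc msid-semantic insert with a single separation pass that indexes the first media line per prefix in a set-if-absent dict and splices the msid line in right after the first a=group:BUNDLE line; the media list is never materialised.
import Mathlib
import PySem

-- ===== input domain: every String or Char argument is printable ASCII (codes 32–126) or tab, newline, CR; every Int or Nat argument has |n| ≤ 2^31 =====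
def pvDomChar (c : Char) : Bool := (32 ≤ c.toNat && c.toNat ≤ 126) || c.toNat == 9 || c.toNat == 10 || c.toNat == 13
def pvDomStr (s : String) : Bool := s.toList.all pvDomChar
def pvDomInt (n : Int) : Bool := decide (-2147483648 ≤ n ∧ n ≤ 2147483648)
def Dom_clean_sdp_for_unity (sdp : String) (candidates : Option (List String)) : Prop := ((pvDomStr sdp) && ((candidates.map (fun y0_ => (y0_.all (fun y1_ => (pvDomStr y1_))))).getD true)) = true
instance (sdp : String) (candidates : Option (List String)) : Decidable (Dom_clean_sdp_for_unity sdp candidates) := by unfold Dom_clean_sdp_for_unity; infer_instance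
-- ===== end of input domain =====

-- B makes one pass instead of seven media scans: a first-match dict index plus on-the-fly msid insertion; same return value, no speed claim.

-- ===== PORT A =====
-- A-side helper: the body of A's separation loop (one Python iteration, state = (in_media, session, media)).
def pvAStep (st : Bool × List String × List String) (line : String) : Bool × List String × List String :=
  if PySem.Str.strip line = "" then st
  else
    let in_media := st.1 || PySem.Str.startswith line "m="
    if PySem.Str.startswith line "a=extmap-allow-mixed" || PySem.Str.startswith line "a=ice-options" then
      (in_media, st.2.1, st.2.2)
    else if in_media then (in_media, st.2.1, st.2.2 ++ [line])
    else (in_media, st.2.1 ++ [line], st.2.2)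

-- A-side helper: A's msid-semantic insertion (next(...)-with-default then insert/append).
def pvInsertMsid (session : List String) : List String :=
  let insert_idx : Int :=
    match session.findIdx? (fun l => PySem.Str.startswith l "a=group:BUNDLE") with
    | some i => (i : Int)
    | none => -1
  if insert_idx ≠ -1 then PySem.List.insert session (insert_idx + 1) "a=msid-semantic: WMS"
  else session ++ ["a=msid-semantic: WMS"]

def clean_sdp_for_unity (sdp : String) (candidates : Option (List String)) : String :=
  let lines := PySem.Str.splitlines sdp
  let st := lines.foldl pvAStep (false, [], [])
  let session := pvInsertMsid st.2.1
  let media := st.2.2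
  let m_application := media.find? (fun l => PySem.Str.startswith l "m=application")
  let c_line := media.find? (fun l => PySem.Str.startswith l "c=IN")
  let mid := media.find? (fun l => PySem.Str.startswith l "a=mid")
  let sctp := media.find? (fun l => PySem.Str.startswith l "a=sctp-port")
  let fingerprint := media.find? (fun l => PySem.Str.startswith l "a=fingerprint:sha-256")
  let ice_ufrag := media.find? (fun l => PySem.Str.startswith l "a=ice-ufrag")
  let ice_pwd := media.find? (fun l => PySem.Str.startswith l "a=ice-pwd")
  let new_media : List (Option String) := [m_application, c_line, mid, sctp]
  -- `if candidates:` — truthy iff candidates is a non-empty list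
  let new_media := if (candidates.getD []).isEmpty then new_media
    else new_media ++ (candidates.getD []).map some ++ [some "a=end-of-candidates"]
  let new_media := new_media ++ [ice_ufrag, ice_pwd, fingerprint, some "a=setup:active"]
  -- `[l for l in new_media if l]` keeps non-None, non-empty strings
  let kept := new_media.filterMap (fun o => match o with
    | some l => if l = "" then none else some l
    | none => none)
  PySem.Str.join "\r\n" (session ++ kept)

-- ===== PORT B =====
-- B-side helper: the tuple of prefixes B indexes.
def pvPrefixes : List String :=
  ["m=application", "c=IN", "a=mid", "a=sctp-port", "a=fingerprint:sha-256", "a=ice-ufrag", "a=ice-pwd"]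

-- B-side helper: the body of B's single loop (state = (in_media, session, bundle_seen, fields)).
def pvBStep (st : Bool × List String × Bool × PySem.Dict String String) (line : String) :
    Bool × List String × Bool × PySem.Dict String String :=
  if PySem.Str.strip line = "" then st
  else
    let in_media := st.1 || PySem.Str.startswith line "m="
    if PySem.Str.startswith line "a=extmap-allow-mixed" || PySem.Str.startswith line "a=ice-options" then
      (in_media, st.2.1, st.2.2.1, st.2.2.2)
    else if in_media then
      (in_media, st.2.1, st.2.2.1,
        pvPrefixes.foldl (fun d p =>
          if (d.get? p).isNone && PySem.Str.startswith line p then d.insert p line else d) st.2.2.2)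
    else if !st.2.2.1 && PySem.Str.startswith line "a=group:BUNDLE" then
      (in_media, st.2.1 ++ [line, "a=msid-semantic: WMS"], true, st.2.2.2)
    else (in_media, st.2.1 ++ [line], st.2.2.1, st.2.2.2)

def clean_sdp_for_unity_alt (sdp : String) (candidates : Option (List String)) : String :=
  let st := (PySem.Str.splitlines sdp).foldl pvBStep (false, [], false, PySem.Dict.empty)
  let bundle_seen := st.2.2.1
  let fields := st.2.2.2
  let session := if bundle_seen then st.2.1 else st.2.1 ++ ["a=msid-semantic: WMS"]
  let tail : List (Option String) :=
    [fields.get? "m=application", fields.get? "c=IN", fields.get? "a=mid", fields.get? "a=sctp-port"]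
  let tail := if (candidates.getD []).isEmpty then tail
    else tail ++ (candidates.getD []).map some ++ [some "a=end-of-candidates"]
  let tail := tail ++ [fields.get? "a=ice-ufrag", fields.get? "a=ice-pwd",
    fields.get? "a=fingerprint:sha-256", some "a=setup:active"]
  PySem.Str.join "\r\n" (session ++ tail.filterMap (fun o => match o with
    | some l => if l = "" then none else some l
    | none => none))

-- ===== PRECONDITION & SPEC =====
def Spec_clean_sdp_for_unity (sdp : String) (candidates : Option (List String)) (out : String) : Prop := out = clean_sdp_for_unity_alt sdp candidates
instance (sdp : String) (candidates : Option (List String)) (out : String) : Decidable (Spec_clean_sdp_for_unity sdp candidates out) := by unfold Spec_clean_sdp_for_unity; infer_instance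

-- ===== CLAIM (what is proved, stated in full; the proofs are below) =====
def Claim_equal_clean_sdp_for_unity : Prop := ∀ (sdp : String) (candidates : Option (List String)), Dom_clean_sdp_for_unity sdp candidates → Spec_clean_sdp_for_unity sdp candidates (clean_sdp_for_unity sdp candidates)

-- ===== LEMMAS AND PROOFS =====

-- the bundle predicate, abbreviated
def pvBdl (l : String) : Bool := PySem.Str.startswith l "a=group:BUNDLE"

-- set-if-absent fold over the prefix list: characterise the resulting lookups
lemma pv_fold_get? (ps : List String) (d : PySem.Dict String String) (line q : String) :
    (ps.foldl (fun d p =>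
        if (d.get? p).isNone && PySem.Str.startswith line p then d.insert p line else d) d).get? q =
      if q ∈ ps ∧ (d.get? q).isNone ∧ PySem.Str.startswith line q then some line else d.get? q := by
  induction ps generalizing d with
  | nil => simp
  | cons p ps ih =>
    simp only [List.foldl_cons]
    rw [ih]
    clear ih
    by_cases hpq : q = p
    · subst hpq
      by_cases h1 : (d.get? q).isNone <;> by_cases h2 : PySem.Str.startswith line q = true <;>
        simp_all [PySem.Dict.get?_insert_self]
    · have hkeep : ((if (d.get? p).isNone && PySem.Str.startswith line p then d.insert p line else d).get? q) = d.get? q := by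
        split
        · exact PySem.Dict.get?_insert_of_ne _ _ hpq
        · rfl
      simp only [hkeep]
      by_cases hq : q ∈ ps <;> simp [hq, hpq]

-- if a bundle line is already present, msid insertion commutes with appending a line
lemma pv_insert_append (sa : List String) (line : String) (h : sa.any pvBdl = true) :
    pvInsertMsid (sa ++ [line]) = pvInsertMsid sa ++ [line] := by
  obtain ⟨i, hi⟩ : ∃ i, sa.findIdx? (fun l => PySem.Str.startswith l "a=group:BUNDLE") = some i := by
    rcases ho : sa.findIdx? (fun l => PySem.Str.startswith l "a=group:BUNDLE") with _ | i
    · rw [List.findIdx?_eq_none_iff] at ho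
      rw [List.any_eq_true] at h
      obtain ⟨x, hx, hb⟩ := h
      exact absurd (ho x hx) (by simp [pvBdl] at hb; simp [hb])
    · exact ⟨i, rfl⟩
  have hilt : i < sa.length := (List.findIdx?_eq_some_iff_findIdx_eq.mp hi).1
  have happ : (sa ++ [line]).findIdx? (fun l => PySem.Str.startswith l "a=group:BUNDLE") = some i := by
    rw [List.findIdx?_append, hi]; rfl
  unfold pvInsertMsid
  rw [hi, happ]
  have hne : ((i : Int) ≠ -1) := by omega
  simp only [hne, if_pos, ne_eq, not_false_iff]
  have h1 : ((i : Int) + 1) = ((i + 1 : Nat) : Int) := by push_cast; ring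
  rw [h1, PySem.List.insert_natCast _ _ _ (by simp [List.length_append]; omega),
      PySem.List.insert_natCast _ _ _ (by omega)]
  rw [List.take_append_of_le_length (by omega), List.drop_append_of_le_length (by omega)]
  simp

-- no bundle line yet: appending the first bundle line makes insertion append msid right after it
lemma pv_insert_first (sa : List String) (line : String) (h : sa.any pvBdl = false)
    (hl : pvBdl line = true) :
    pvInsertMsid (sa ++ [line]) = sa ++ [line, "a=msid-semantic: WMS"] := by
  have hno : sa.findIdx? (fun l => PySem.Str.startswith l "a=group:BUNDLE") = none := by
    rw [List.findIdx?_eq_none_iff]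
    intro x hx
    have := List.any_eq_false.mp h x hx
    simpa [pvBdl] using this
  have happ : (sa ++ [line]).findIdx? (fun l => PySem.Str.startswith l "a=group:BUNDLE") = some sa.length := by
    rw [List.findIdx?_append, hno]
    simp [pvBdl] at hl
    simp [hl]
  unfold pvInsertMsid
  rw [happ]
  have hne : ((sa.length : Int) ≠ -1) := by omega
  simp only [hne, if_pos, ne_eq, not_false_iff]
  have h1 : ((sa.length : Int) + 1) = ((sa.length + 1 : Nat) : Int) := by push_cast; ring
  rw [h1, PySem.List.insert_natCast _ _ _ (by simp)]
  rw [List.take_of_length_le (by simp), List.drop_eq_nil_of_le (by simp)]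
  simp

-- no bundle line at all: insertion appends msid at the end
lemma pv_insert_none (sa : List String) (h : sa.any pvBdl = false) :
    pvInsertMsid sa = sa ++ ["a=msid-semantic: WMS"] := by
  have hno : sa.findIdx? (fun l => PySem.Str.startswith l "a=group:BUNDLE") = none := by
    rw [List.findIdx?_eq_none_iff]
    intro x hx
    have := List.any_eq_false.mp h x hx
    simpa [pvBdl] using this
  unfold pvInsertMsid
  rw [hno]
  simp

-- the loop invariant relating A's fold state to B's fold state
lemma pv_loop_inv (lines : List String) (im : Bool) (sa med sb : List String) (bu : Bool)
    (d : PySem.Dict String String)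
    (h1 : bu = sa.any pvBdl)
    (h2 : sb = if bu then pvInsertMsid sa else sa)
    (h3 : ∀ p ∈ pvPrefixes, d.get? p = med.find? (fun l => PySem.Str.startswith l p)) :
    (lines.foldl pvBStep (im, sb, bu, d)).1 = (lines.foldl pvAStep (im, sa, med)).1 ∧
    (lines.foldl pvBStep (im, sb, bu, d)).2.2.1 = ((lines.foldl pvAStep (im, sa, med)).2.1).any pvBdl ∧
    (lines.foldl pvBStep (im, sb, bu, d)).2.1 =
      (if (lines.foldl pvBStep (im, sb, bu, d)).2.2.1 then pvInsertMsid (lines.foldl pvAStep (im, sa, med)).2.1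
       else (lines.foldl pvAStep (im, sa, med)).2.1) ∧
    (∀ p, p ∈ pvPrefixes →
      (lines.foldl pvBStep (im, sb, bu, d)).2.2.2.get? p =
        (lines.foldl pvAStep (im, sa, med)).2.2.find? (fun l => PySem.Str.startswith l p)) := by
  induction lines generalizing im sa med sb bu d with
  | nil =>
    refine ⟨rfl, h1.symm ▸ rfl, ?_, fun p hp => by simpa using h3 p hp⟩
    simp only [List.foldl_nil, h2]
  | cons line rest ih =>
    simp only [List.foldl_cons]
    by_cases hstrip : PySem.Str.strip line = ""
    · have ha : pvAStep (im, sa, med) line = (im, sa, med) := by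
        simp only [pvAStep, if_pos hstrip]
      have hb : pvBStep (im, sb, bu, d) line = (im, sb, bu, d) := by
        simp only [pvBStep, if_pos hstrip]
      rw [ha, hb]
      exact ih im sa med sb bu d h1 h2 h3
    · by_cases hbad : (PySem.Str.startswith line "a=extmap-allow-mixed" || PySem.Str.startswith line "a=ice-options") = true
      · have ha : pvAStep (im, sa, med) line = (im || PySem.Str.startswith line "m=", sa, med) := by
          simp only [pvAStep, if_neg hstrip, if_pos hbad]
        have hb : pvBStep (im, sb, bu, d) line = (im || PySem.Str.startswith line "m=", sb, bu, d) := by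
          simp only [pvBStep, if_neg hstrip, if_pos hbad]
        rw [ha, hb]
        exact ih _ sa med sb bu d h1 h2 h3
      · by_cases him : (im || PySem.Str.startswith line "m=") = true
        · -- media line: A appends to media, B indexes it
          have ha : pvAStep (im, sa, med) line = (im || PySem.Str.startswith line "m=", sa, med ++ [line]) := by
            simp only [pvAStep, if_neg hstrip, if_neg hbad, if_pos him]
          have hb : pvBStep (im, sb, bu, d) line = (im || PySem.Str.startswith line "m=", sb, bu,
              pvPrefixes.foldl (fun d p =>
                if (d.get? p).isNone && PySem.Str.startswith line p then d.insert p line else d) d) := by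
            simp only [pvBStep, if_neg hstrip, if_neg hbad, if_pos him]
          rw [ha, hb]
          refine ih _ sa (med ++ [line]) sb bu _ h1 h2 ?_
          intro p hp
          rw [pv_fold_get? pvPrefixes d line p, List.find?_append, h3 p hp]
          rcases hf : med.find? (fun l => PySem.Str.startswith l p) with _ | x
          · simp [hp]
          · simp [hp]
        · -- session line
          by_cases hbu : bu = true
          · have ha : pvAStep (im, sa, med) line = (im || PySem.Str.startswith line "m=", sa ++ [line], med) := by
              simp only [pvAStep, if_neg hstrip, if_neg hbad, if_neg him]
            have hb : pvBStep (im, sb, bu, d) line = (im || PySem.Str.startswith line "m=", sb ++ [line], bu, d) := by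
              simp only [pvBStep, if_neg hstrip, if_neg hbad, if_neg him]
              rw [if_neg (by rw [hbu]; simp)]
            rw [ha, hb]
            refine ih _ (sa ++ [line]) med (sb ++ [line]) bu d ?_ ?_ h3
            · rw [List.any_append]; simp [← h1, hbu]
            · rw [h2]; simp [hbu, pv_insert_append sa line (h1.symm.trans hbu)]
          · have hbuf : bu = false := by simpa using hbu
            by_cases hbl : PySem.Str.startswith line "a=group:BUNDLE" = true
            · have ha : pvAStep (im, sa, med) line = (im || PySem.Str.startswith line "m=", sa ++ [line], med) := by
                simp only [pvAStep, if_neg hstrip, if_neg hbad, if_neg him]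
              have hb : pvBStep (im, sb, bu, d) line = (im || PySem.Str.startswith line "m=",
                  sb ++ [line, "a=msid-semantic: WMS"], true, d) := by
                simp only [pvBStep, if_neg hstrip, if_neg hbad, if_neg him]
                rw [if_pos (by rw [hbuf, hbl]; rfl)]
              rw [ha, hb]
              refine ih _ (sa ++ [line]) med (sb ++ [line, "a=msid-semantic: WMS"]) true d ?_ ?_ h3
              · rw [List.any_append]
                have h0 : sa.any pvBdl = false := h1.symm.trans hbuf
                have hl1 : [line].any pvBdl = true := by
                  simp only [List.any_cons, List.any_nil, Bool.or_false, pvBdl]; exact hbl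
                rw [h0, hl1]
                rfl
              · rw [h2]; simp [hbuf, pv_insert_first sa line (h1.symm.trans hbuf) (by simpa [pvBdl] using hbl)]
            · have hblf : PySem.Str.startswith line "a=group:BUNDLE" = false := by simpa using hbl
              have ha : pvAStep (im, sa, med) line = (im || PySem.Str.startswith line "m=", sa ++ [line], med) := by
                simp only [pvAStep, if_neg hstrip, if_neg hbad, if_neg him]
              have hb : pvBStep (im, sb, bu, d) line = (im || PySem.Str.startswith line "m=", sb ++ [line], bu, d) := by
                simp only [pvBStep, if_neg hstrip, if_neg hbad, if_neg him]
                rw [if_neg (by rw [hbuf, hblf]; simp)]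
              rw [ha, hb]
              refine ih _ (sa ++ [line]) med (sb ++ [line]) bu d ?_ ?_ h3
              · rw [List.any_append]
                have h0 : sa.any pvBdl = false := h1.symm.trans hbuf
                have hl1 : [line].any pvBdl = false := by
                  simp only [List.any_cons, List.any_nil, Bool.or_false, pvBdl]; exact hblf
                rw [hbuf, h0, hl1]
                rfl
              · rw [h2]; simp [hbuf]

-- ===== VERDICT (by name: the statement is the Claim_ definition above) =====
theorem clean_sdp_for_unity_spec : Claim_equal_clean_sdp_for_unity := by
  intro sdp candidates _
  unfold Spec_clean_sdp_for_unity clean_sdp_for_unity clean_sdp_for_unity_alt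
  obtain ⟨e1, e2, e3, e4⟩ := pv_loop_inv (PySem.Str.splitlines sdp) false [] [] [] false
    PySem.Dict.empty rfl rfl (fun p _ => by simp)
  dsimp only
  rw [e4 "m=application" (by decide), e4 "c=IN" (by decide), e4 "a=mid" (by decide),
      e4 "a=sctp-port" (by decide), e4 "a=fingerprint:sha-256" (by decide),
      e4 "a=ice-ufrag" (by decide), e4 "a=ice-pwd" (by decide)]
  cases hbu : (List.foldl pvBStep (false, [], false, PySem.Dict.empty) (PySem.Str.splitlines sdp)).2.2.1 with
  | false =>
    rw [hbu] at e3
    simp only [Bool.false_eq_true, reduceIte] at e3 ⊢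
    rw [e3, pv_insert_none _ (e2.symm.trans hbu)]
  | true =>
    rw [hbu] at e3
    simp only [reduceIte] at e3 ⊢
    rw [e3]
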